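-- pv_equiv track=rewrite | github.com/PrashanthaTP/wav2mov | wav2mov/datasets/create_file_list.py | get_train_test_list
-- ===== SOURCE A (Python) =====
-- VIDEOS_PER_ACTOR = 30
--
-- def get_actors(folders_list):
--   actors = set()
--   for folder in folders_list:
--     actors.add(folder.split('_')[0])
--   return sorted(actors)
--
-- def get_train_test_list(folders_list):
--     actors = get_actors(folders_list)
--     train_actors = set(actors[:-1])
--     train_dict = {}
--     test_list = []
--     for folder in folders_list:
--       actor = folder.split('_')[0]
--       if actor in train_actors:
--         if len(train_dict.get(actor,[]))<VIDEOS_PER_ACTOR: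
--           train_dict.setdefault(actor,[]).append(folder)
--       else:
--           test_list.append(folder)
--
--     train_list = []
--     for val in train_dict.values():
--       train_list.extend(val)
--     return train_list,test_list
-- ===== SOURCE B (Python) =====
-- VIDEOS_PER_ACTOR = 30
--
-- def get_train_test_list(folders_list):
--     if not folders_list:
--         return [], []
--     test_actor = max(f.split('_')[0] for f in folders_list)
--     seen = []
--     for f in folders_list:
--         a = f.split('_')[0]
--         if a not in seen:
--             seen.append(a)
--     train_list = []
--     for a in seen:
--         if a != test_actor:
--             train_list.extend([f for f in folders_list
--                                if f.split('_')[0] == a][:VIDEOS_PER_ACTOR])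
--     test_list = [f for f in folders_list if f.split('_')[0] == test_actor]
--     return train_list, test_list
-- ===== Notes on version B (the rewrite author's own statement) =====
-- stated objective: alternative
-- what changed: B drops A's dict and set machinery entirely: it computes the test actor with a plain max over prefixes, dedups the prefixes into a first-appearance list, and builds the train list by re-filtering the input once per remaining actor (taking the first 30), and the test list by one more filter.
import Mathlib
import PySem

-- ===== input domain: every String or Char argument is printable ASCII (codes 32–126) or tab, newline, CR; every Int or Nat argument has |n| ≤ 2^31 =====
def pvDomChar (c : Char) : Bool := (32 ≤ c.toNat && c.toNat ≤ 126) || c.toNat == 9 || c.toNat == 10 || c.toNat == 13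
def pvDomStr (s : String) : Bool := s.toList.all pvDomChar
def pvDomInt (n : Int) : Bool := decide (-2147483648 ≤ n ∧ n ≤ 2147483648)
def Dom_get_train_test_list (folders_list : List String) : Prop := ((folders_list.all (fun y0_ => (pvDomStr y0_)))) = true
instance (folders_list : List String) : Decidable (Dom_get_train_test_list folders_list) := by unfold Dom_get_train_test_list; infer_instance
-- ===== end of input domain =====

-- B replaces A's sorted-set/capped-dict bookkeeping by a dict-free staged computation: max over
-- prefixes for the test actor, a dedup of the prefixes, and one filter pass per remaining actor.

-- ===== PORT A =====
-- folder.split('_')[0]: split with a nonempty separator returns some nonempty list, so getD/headD are exact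
def pvActor (f : String) : String := ((PySem.Str.split? f "_").getD []).headD ""

def get_actors (folders_list : List String) : List String :=
  let actors : PySem.Set String :=
    folders_list.foldl (fun s folder => PySem.Set.add s (pvActor folder)) PySem.Set.empty
  PySem.List.sorted actors (fun x => x) false

def get_train_test_list (folders_list : List String) : List String × List String :=
  let actors := get_actors folders_list
  let train_actors : PySem.Set String := PySem.Set.ofList (PySem.List.slice actors none (some (-1)))
  let st := folders_list.foldl
    (fun (st : PySem.Dict String (List String) × List String) folder =>
      let actor := pvActor folder
      if PySem.Set.contains train_actors actor then
        if (st.1.getD actor []).length < 30 then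
          -- train_dict.setdefault(actor,[]).append(folder)
          (st.1.modify actor [] (fun v => v ++ [folder]), st.2)
        else st
      else (st.1, st.2 ++ [folder]))
    (PySem.Dict.empty, [])
  (st.1.values.foldl (fun acc val => acc ++ val) [], st.2)

-- ===== PORT B =====
def get_train_test_list_alt (folders_list : List String) : List String × List String :=
  if folders_list = [] then ([], [])
  else
    -- max over the nonempty prefix generator; the none branch is unreachable here
    match PySem.List.max? (folders_list.map pvActor) (fun x => x) with
    | none => ([], [])
    | some test_actor =>
      -- the seen-loop appends each unseen prefix: exactly PySem.Set.add
      let seen : PySem.Set String :=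
        folders_list.foldl (fun s f => PySem.Set.add s (pvActor f)) PySem.Set.empty
      let train_list := seen.foldl
        (fun acc a =>
          if !(a == test_actor) then
            acc ++ (folders_list.filter (fun f => pvActor f == a)).take 30
          else acc) []
      (train_list, folders_list.filter (fun f => pvActor f == test_actor))

-- ===== PRECONDITION & SPEC =====
def Spec_get_train_test_list (folders_list : List String) (out : List String × List String) : Prop := out = get_train_test_list_alt folders_list
instance (folders_list : List String) (out : List String × List String) : Decidable (Spec_get_train_test_list folders_list out) := by unfold Spec_get_train_test_list; infer_instance

-- ===== CLAIM (what is proved, stated in full; the proofs are below) =====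
def Claim_equal_get_train_test_list : Prop := ∀ (folders_list : List String), Dom_get_train_test_list folders_list → Spec_get_train_test_list folders_list (get_train_test_list folders_list)

-- ===== LEMMAS AND PROOFS =====

-- A's loop over the pair state is the pair of the two independent loops
theorem pv_fold_split (T : PySem.Set String) (l : List String)
    (td : PySem.Dict String (List String)) (tl : List String) :
    l.foldl (fun (st : PySem.Dict String (List String) × List String) folder =>
      let actor := pvActor folder
      if PySem.Set.contains T actor then
        if (st.1.getD actor []).length < 30 then
          (st.1.modify actor [] (fun v => v ++ [folder]), st.2)
        else st
      else (st.1, st.2 ++ [folder])) (td, tl)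
    = (l.foldl (fun td folder =>
        let actor := pvActor folder
        if PySem.Set.contains T actor then
          (if (td.getD actor []).length < 30 then td.modify actor [] (fun v => v ++ [folder]) else td)
        else td) td,
       l.foldl (fun tl folder =>
        if PySem.Set.contains T (pvActor folder) then tl else tl ++ [folder]) tl) := by
  induction l generalizing td tl with
  | nil => rfl
  | cons f t ih =>
    simp only [List.foldl_cons]
    split_ifs <;> exact ih _ _

-- the test-side loop accumulates exactly the non-train folders
theorem pv_fold_test (T : PySem.Set String) (l : List String) (tl : List String) :
    l.foldl (fun tl folder =>
      if PySem.Set.contains T (pvActor folder) then tl else tl ++ [folder]) tl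
    = tl ++ l.filter (fun f => !(PySem.Set.contains T (pvActor f))) := by
  induction l generalizing tl with
  | nil => simp
  | cons f t ih =>
    simp only [List.foldl_cons, List.filter_cons]
    by_cases h : PySem.Set.contains T (pvActor f) = true
    · rw [if_pos h, ih, h]
      simp
    · rw [if_neg h, ih]
      rw [Bool.not_eq_true] at h
      rw [h]
      simp

-- the grouping dict (a proof-side object relating the two programs) looked up at any key
theorem pv_groups_getD (l : List String) (c : String) :
    (l.foldl (fun d folder => d.modify (pvActor folder) [] (fun v => v ++ [folder]))
      (PySem.Dict.empty : PySem.Dict String (List String))).getD c []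
    = l.filter (fun f => pvActor f == c) := by
  have h := PySem.Dict.getD_foldl_modify_append (l.map (fun f => (pvActor f, f)))
    (PySem.Dict.empty : PySem.Dict String (List String)) c
  rw [List.foldl_map] at h
  rw [h, PySem.Dict.getD_empty]
  simp [List.filter_map, Function.comp_def]

-- the filter/truncate view of A's train dict relative to the grouping dict
def pvP (ta : String) : String × List String → Bool := fun p => !(p.1 == ta)
def pvF : String × List String → String × List String := fun p => (p.1, p.2.take 30)

theorem pv_rel_keys (ta : String) (td g : PySem.Dict String (List String))
    (h : td.items = (g.items.filter (pvP ta)).map pvF) :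
    td.keys = (g.items.filter (pvP ta)).map Prod.fst := by
  simp only [PySem.Dict.keys, h, List.map_map]
  rfl

theorem pv_rel_nodup (ta : String) (td g : PySem.Dict String (List String))
    (hnd : g.keys.Nodup) (h : td.items = (g.items.filter (pvP ta)).map pvF) :
    td.keys.Nodup := by
  rw [pv_rel_keys ta td g h]
  have hs : ((g.items.filter (pvP ta)).map Prod.fst).Sublist (g.items.map Prod.fst) :=
    List.Sublist.map Prod.fst List.filter_sublist
  exact hs.nodup (by simpa only [PySem.Dict.keys] using hnd)

theorem pv_rel_mem_keys (ta : String) (td g : PySem.Dict String (List String)) (k : String)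
    (h : td.items = (g.items.filter (pvP ta)).map pvF) (hk : k ≠ ta) :
    k ∈ td.keys ↔ k ∈ g.keys := by
  rw [pv_rel_keys ta td g h]
  simp only [PySem.Dict.keys, List.mem_map, List.mem_filter]
  constructor
  · rintro ⟨p, ⟨hp, _⟩, rfl⟩
    exact ⟨p, hp, rfl⟩
  · rintro ⟨p, hp, rfl⟩
    exact ⟨p, ⟨hp, by simp [pvP, hk]⟩, rfl⟩

theorem pv_rel_contains (ta : String) (td g : PySem.Dict String (List String)) (k : String)
    (h : td.items = (g.items.filter (pvP ta)).map pvF) (hk : k ≠ ta) :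
    td.contains k = g.contains k := by
  rw [PySem.Dict.contains_eq_decide_mem_keys, PySem.Dict.contains_eq_decide_mem_keys]
  simp only [pv_rel_mem_keys ta td g k h hk]

theorem pv_rel_getD (ta : String) (td g : PySem.Dict String (List String)) (k : String)
    (hnd : g.keys.Nodup) (h : td.items = (g.items.filter (pvP ta)).map pvF) (hk : k ≠ ta) :
    td.getD k [] = (g.getD k []).take 30 := by
  cases hg : g.get? k with
  | none =>
    have hkk : k ∉ g.keys := (PySem.Dict.get?_eq_none_iff_not_mem_keys g k).mp hg
    have htk : k ∉ td.keys := fun hh => hkk ((pv_rel_mem_keys ta td g k h hk).mp hh)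
    rw [PySem.Dict.getD_of_get?_eq_none td []
          ((PySem.Dict.get?_eq_none_iff_not_mem_keys td k).mpr htk),
        PySem.Dict.getD_of_get?_eq_none g [] hg]
    rfl
  | some v =>
    have hmem := PySem.Dict.mem_items_of_get?_eq_some g hg
    have hmem2 : (k, v.take 30) ∈ td.items := by
      rw [h]
      exact List.mem_map.mpr ⟨(k, v), List.mem_filter.mpr ⟨hmem, by simp [pvP, hk]⟩, rfl⟩
    rw [PySem.Dict.getD_of_mem_items td hmem2 (pv_rel_nodup ta td g hnd h) [],
        PySem.Dict.getD_of_get?_eq_some g [] hg]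

-- replacing the value at one key commutes with filtering away another key
theorem pv_filter_replace (ta a : String) (w : List String) (items : List (String × List String)) :
    (items.map (fun p => if (p.1 == a) = true then (a, w) else p)).filter (pvP ta)
    = (items.filter (pvP ta)).map (fun p => if (p.1 == a) = true then (a, w) else p) := by
  rw [List.filter_map]
  congr 1
  apply List.filter_congr
  intro p _
  by_cases hp : (p.1 == a) = true
  · have hpa : p.1 = a := by simpa using hp
    simp [Function.comp, pvP, hpa]
  · simp [Function.comp, pvP, hp]

theorem pv_insert_rel (ta a : String) (w : List String) (td g : PySem.Dict String (List String))
    (_hnd : g.keys.Nodup) (h : td.items = (g.items.filter (pvP ta)).map pvF) (ha : a ≠ ta) :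
    (td.insert a (w.take 30)).items = ((g.insert a w).items.filter (pvP ta)).map pvF := by
  by_cases hc : g.contains a = true
  · have hct : td.contains a = true := by rw [pv_rel_contains ta td g a h ha]; exact hc
    rw [PySem.Dict.items_insert_of_contains g w hc,
        PySem.Dict.items_insert_of_contains td (w.take 30) hct,
        pv_filter_replace, h, List.map_map, List.map_map]
    apply List.map_congr_left
    intro p _
    by_cases hpa : (p.1 == a) = true
    · have hp1 : p.1 = a := by simpa using hpa
      simp [Function.comp, pvF, hp1]
    · simp [Function.comp, pvF, hpa]
  · have hcf : g.contains a = false := by simpa using hc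
    have hctf : td.contains a = false := by rw [pv_rel_contains ta td g a h ha]; exact hcf
    rw [PySem.Dict.items_insert_of_not_contains g w hcf,
        PySem.Dict.items_insert_of_not_contains td (w.take 30) hctf,
        List.filter_append, List.map_append, h]
    congr 1
    simp [pvP, pvF, ha]

theorem pv_skip_rel (ta a f : String) (td g : PySem.Dict String (List String))
    (hnd : g.keys.Nodup) (h : td.items = (g.items.filter (pvP ta)).map pvF) (_ha : a ≠ ta)
    (hlen : 30 ≤ (g.getD a []).length) :
    td.items = ((g.insert a (g.getD a [] ++ [f])).items.filter (pvP ta)).map pvF := by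
  have hc : g.contains a = true := by
    by_contra hc'
    have h0 : g.getD a [] = [] := PySem.Dict.getD_of_not_contains g [] (by simpa using hc')
    rw [h0] at hlen
    simp at hlen
  rw [PySem.Dict.items_insert_of_contains g _ hc, pv_filter_replace, List.map_map, h]
  apply List.map_congr_left
  intro p hp
  have hpf : p ∈ g.items := (List.mem_filter.mp hp).1
  by_cases hpa : (p.1 == a) = true
  · have hp1 : p.1 = a := by simpa using hpa
    have hget : g.get? p.1 = some p.2 := PySem.Dict.get?_of_mem_items g (by simpa using hpf) hnd
    have h2 : g.getD a [] = p.2 := by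
      rw [hp1] at hget
      exact PySem.Dict.getD_of_get?_eq_some g [] hget
    show pvF p = pvF (if (p.1 == a) = true then (a, g.getD a [] ++ [f]) else p)
    rw [if_pos hpa]
    show (p.1, p.2.take 30) = (a, (g.getD a [] ++ [f]).take 30)
    rw [List.take_append_of_le_length hlen, hp1, h2]
  · simp [Function.comp, pvF, hpa]

theorem pv_ta_rel (ta : String) (w : List String) (td g : PySem.Dict String (List String))
    (h : td.items = (g.items.filter (pvP ta)).map pvF) :
    td.items = ((g.insert ta w).items.filter (pvP ta)).map pvF := by
  by_cases hc : g.contains ta = true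
  · rw [PySem.Dict.items_insert_of_contains g w hc, pv_filter_replace, List.map_map, h]
    apply List.map_congr_left
    intro p hp
    have hP : pvP ta p = true := (List.mem_filter.mp hp).2
    have hpa : (p.1 == ta) = false := by simpa [pvP] using hP
    simp [Function.comp, pvF, hpa]
  · rw [PySem.Dict.items_insert_of_not_contains g w (by simpa using hc), List.filter_append, h]
    simp [pvP]

theorem pv_nodup_modify (a f : String) (g : PySem.Dict String (List String))
    (hnd : g.keys.Nodup) :
    (g.modify a [] (fun v => v ++ [f])).keys.Nodup := by
  have := PySem.Dict.nodup_keys_foldl_modify_key [f] (fun _ => a) []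
    (fun _ x v => v ++ [x]) g hnd
  simpa using this

-- the train-dict invariant: A's capped dict is the grouping dict, filtered and truncated
theorem pv_td_inv (ta : String) (T : PySem.Set String) (l : List String)
    (hl : ∀ f ∈ l, (PySem.Set.contains T (pvActor f) = true ↔ pvActor f ≠ ta))
    (td g : PySem.Dict String (List String))
    (hnd : g.keys.Nodup)
    (hitems : td.items = (g.items.filter (pvP ta)).map pvF) :
    (l.foldl (fun td folder =>
        let actor := pvActor folder
        if PySem.Set.contains T actor then
          (if (td.getD actor []).length < 30 then td.modify actor [] (fun v => v ++ [folder]) else td)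
        else td) td).items
    = ((l.foldl (fun d folder => d.modify (pvActor folder) [] (fun v => v ++ [folder])) g).items.filter
        (pvP ta)).map pvF := by
  induction l generalizing td g with
  | nil => simpa using hitems
  | cons f t ih =>
    simp only [List.foldl_cons]
    have hf := hl f (List.mem_cons_self ..)
    have hl' : ∀ x ∈ t, (PySem.Set.contains T (pvActor x) = true ↔ pvActor x ≠ ta) :=
      fun x hx => hl x (List.mem_cons_of_mem _ hx)
    have hnd' := pv_nodup_modify (pvActor f) f g hnd
    by_cases hc : PySem.Set.contains T (pvActor f) = true
    · have ha : pvActor f ≠ ta := hf.mp hc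
      rw [if_pos hc]
      by_cases hlt : (td.getD (pvActor f) []).length < 30
      · rw [if_pos hlt]
        apply ih hl' _ _ hnd'
        have hgetD := pv_rel_getD ta td g (pvActor f) hnd hitems ha
        have hv : (g.getD (pvActor f) []).length < 30 := by
          rw [hgetD, List.length_take] at hlt
          omega
        have hmod : td.modify (pvActor f) [] (fun v => v ++ [f])
            = td.insert (pvActor f) ((g.getD (pvActor f) [] ++ [f]).take 30) := by
          show td.insert (pvActor f) (td.getD (pvActor f) [] ++ [f]) = _
          rw [hgetD, List.take_of_length_le (le_of_lt hv),
              List.take_of_length_le (by simp; omega)]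
        rw [hmod]
        exact pv_insert_rel ta (pvActor f) (g.getD (pvActor f) [] ++ [f]) td g hnd hitems ha
      · rw [if_neg hlt]
        apply ih hl' _ _ hnd'
        have hgetD := pv_rel_getD ta td g (pvActor f) hnd hitems ha
        have hv : 30 ≤ (g.getD (pvActor f) []).length := by
          rw [hgetD, List.length_take] at hlt
          omega
        exact pv_skip_rel ta (pvActor f) f td g hnd hitems ha hv
    · have ha : pvActor f = ta := by
        by_contra hne
        exact hc (hf.mpr hne)
      rw [if_neg hc]
      apply ih hl' _ _ hnd'
      have hmod : g.modify (pvActor f) [] (fun v => v ++ [f])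
          = g.insert ta (g.getD ta [] ++ [f]) := by
        rw [ha]
        rfl
      rw [hmod]
      exact pv_ta_rel ta (g.getD ta [] ++ [f]) td g hitems

-- fold of list append is flatten
theorem pv_foldl_append (L : List (List String)) (acc : List String) :
    L.foldl (fun acc val => acc ++ val) acc = acc ++ L.flatten := by
  induction L generalizing acc with
  | nil => simp
  | cons v t ih => simp [ih]

-- a nodup dict is its key list paired with its lookups
theorem pv_items_char (d : PySem.Dict String (List String)) (hnd : d.keys.Nodup) :
    d.items = d.keys.map (fun k => (k, d.getD k [])) := by
  simp only [PySem.Dict.keys, List.map_map]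
  have h : d.items.map ((fun k => (k, d.getD k [])) ∘ Prod.fst) = d.items.map id := by
    apply List.map_congr_left
    intro p hp
    have hget : d.getD p.1 [] = p.2 :=
      PySem.Dict.getD_of_mem_items d (by simpa using hp) hnd []
    simp [Function.comp, hget]
  rw [h, List.map_id]

-- B's train loop is a flatMap over the non-test actors
theorem pv_fold_train (ta : String) (l : List String) (seen acc : List String) :
    seen.foldl (fun acc a =>
      if !(a == ta) then acc ++ (l.filter (fun f => pvActor f == a)).take 30 else acc) acc
    = acc ++ (seen.filter (fun a => !(a == ta))).flatMap
        (fun a => (l.filter (fun f => pvActor f == a)).take 30) := by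
  induction seen generalizing acc with
  | nil => simp
  | cons a t ih =>
    simp only [List.foldl_cons, List.filter_cons]
    rw [ih]
    by_cases h : (a == ta) = true
    · simp [h]
    · simp [h]

-- ===== VERDICT (by name: the statement is the Claim_ definition above) =====
theorem get_train_test_list_spec : Claim_equal_get_train_test_list := by
  intro l _
  show get_train_test_list l = get_train_test_list_alt l
  have hAA : (l.foldl (fun s folder => PySem.Set.add s (pvActor folder)) PySem.Set.empty)
      = PySem.Set.ofList (l.map pvActor) := by
    rw [← PySem.Set.update_map_eq_foldl_add l pvActor PySem.Set.empty]
    exact PySem.Set.update_nil_left _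
  have hkeys : (l.foldl (fun d folder => d.modify (pvActor folder) [] (fun v => v ++ [folder]))
        (PySem.Dict.empty : PySem.Dict String (List String))).keys
      = PySem.Set.ofList (l.map pvActor) := by
    rw [PySem.Dict.keys_foldl_modify_key l pvActor [] (fun _ x => fun v => v ++ [x])
          PySem.Dict.empty,
        PySem.Dict.keys_empty]
    exact PySem.Set.update_nil_left _
  by_cases hl0 : l = []
  · subst hl0
    decide
  · have hAAne : PySem.Set.ofList (l.map pvActor) ≠ [] := by
      cases l with
      | nil => simp at hl0
      | cons a t =>
        intro hcon
        have hm : pvActor a ∈ PySem.Set.ofList ((a :: t).map pvActor) :=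
          (PySem.Set.mem_ofList _ _).mpr (by simp)
        rw [hcon] at hm
        simp at hm
    obtain ⟨ta, hmax⟩ : ∃ ta, PySem.List.max? (l.map pvActor) (fun x => x) = some ta := by
      cases hm : PySem.List.max? (l.map pvActor) (fun x => x) with
      | none =>
        have := (PySem.List.max?_eq_none_iff _ _).mp hm
        cases l with
        | nil => exact absurd rfl hl0
        | cons a t => simp at this
      | some x => exact ⟨x, rfl⟩
    have hta_mem : ta ∈ PySem.Set.ofList (l.map pvActor) :=
      (PySem.Set.mem_ofList _ _).mpr (PySem.List.max?_mem hmax)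
    have hta_max : ∀ y ∈ PySem.Set.ofList (l.map pvActor), y ≤ ta := by
      intro y hy
      exact PySem.List.max?_isMax hmax y ((PySem.Set.mem_ofList _ _).mp hy)
    have hperm : (PySem.List.sorted (PySem.Set.ofList (l.map pvActor)) (fun x => x) false).Perm
        (PySem.Set.ofList (l.map pvActor)) :=
      PySem.List.sorted_perm _ _ _
    have hpw := PySem.List.sorted_ofList_pairwise_lt (l.map pvActor)
    have hane : PySem.List.sorted (PySem.Set.ofList (l.map pvActor)) (fun x => x) false ≠ [] := by
      intro h
      rw [h] at hperm
      exact hAAne (hperm.symm.eq_nil)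
    have hsplit := List.dropLast_append_getLast hane
    have hlt_last : ∀ x ∈ (PySem.List.sorted (PySem.Set.ofList (l.map pvActor))
        (fun x => x) false).dropLast,
        x < (PySem.List.sorted (PySem.Set.ofList (l.map pvActor)) (fun x => x) false).getLast hane := by
      have hpw2 := hpw
      rw [← hsplit, List.pairwise_append] at hpw2
      intro x hx
      exact hpw2.2.2 x hx _ (by simp)
    have hla_mem : (PySem.List.sorted (PySem.Set.ofList (l.map pvActor)) (fun x => x) false).getLast
        hane ∈ PySem.Set.ofList (l.map pvActor) :=
      hperm.mem_iff.mp (List.getLast_mem hane)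
    have hta_eq : ta = (PySem.List.sorted (PySem.Set.ofList (l.map pvActor))
        (fun x => x) false).getLast hane := by
      have hta_act : ta ∈ PySem.List.sorted (PySem.Set.ofList (l.map pvActor)) (fun x => x) false :=
        hperm.mem_iff.mpr hta_mem
      rw [← hsplit] at hta_act
      rcases List.mem_append.mp hta_act with h | h
      · exact absurd (hta_max _ hla_mem) (not_le.mpr (hlt_last ta h))
      · simpa using h
    have hdrop_iff : ∀ a, a ∈ (PySem.List.sorted (PySem.Set.ofList (l.map pvActor))
        (fun x => x) false).dropLast ↔ (a ∈ PySem.Set.ofList (l.map pvActor) ∧ a ≠ ta) := by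
      intro a
      constructor
      · intro h
        refine ⟨hperm.mem_iff.mp (by rw [← hsplit]; exact List.mem_append_left _ h), ?_⟩
        rw [hta_eq]
        exact ne_of_lt (hlt_last a h)
      · rintro ⟨hmem, hne⟩
        have hin : a ∈ PySem.List.sorted (PySem.Set.ofList (l.map pvActor)) (fun x => x) false :=
          hperm.mem_iff.mpr hmem
        rw [← hsplit] at hin
        rcases List.mem_append.mp hin with h | h
        · exact h
        · have hla : a = (PySem.List.sorted (PySem.Set.ofList (l.map pvActor))
              (fun x => x) false).getLast hane := by simpa using h
          exact absurd (hla.trans hta_eq.symm) hne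
    have hpoint : ∀ f ∈ l, (PySem.Set.contains (PySem.Set.ofList
        ((PySem.List.sorted (PySem.Set.ofList (l.map pvActor)) (fun x => x) false).dropLast))
        (pvActor f) = true ↔ pvActor f ≠ ta) := by
      intro f hf
      have hmem : pvActor f ∈ PySem.Set.ofList (l.map pvActor) :=
        (PySem.Set.mem_ofList _ _).mpr (List.mem_map_of_mem hf)
      rw [PySem.Set.contains_iff, PySem.Set.mem_ofList, hdrop_iff]
      exact ⟨fun h => h.2, fun h => ⟨hmem, h⟩⟩
    have hitems := pv_td_inv ta _ l hpoint PySem.Dict.empty PySem.Dict.empty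
      (by rw [PySem.Dict.keys_empty]; exact List.nodup_nil) rfl
    have hgnd : (l.foldl (fun d folder => d.modify (pvActor folder) [] (fun v => v ++ [folder]))
        (PySem.Dict.empty : PySem.Dict String (List String))).keys.Nodup := by
      rw [hkeys]
      exact PySem.Set.nodup_ofList _
    have hgitems : (l.foldl (fun d folder => d.modify (pvActor folder) [] (fun v => v ++ [folder]))
        (PySem.Dict.empty : PySem.Dict String (List String))).items
        = (PySem.Set.ofList (l.map pvActor)).map
            (fun k => (k, l.filter (fun f => pvActor f == k))) := by
      rw [pv_items_char _ hgnd, hkeys]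
      apply List.map_congr_left
      intro k _
      rw [pv_groups_getD]
    simp only [get_train_test_list, get_train_test_list_alt, get_actors]
    rw [if_neg hl0]
    simp only [PySem.List.slice_to_neg_one, hAA, hmax]
    rw [pv_fold_split]
    simp only [Prod.mk.injEq]
    constructor
    · -- train lists
      simp only [PySem.Dict.values, hitems, hgitems, pv_foldl_append, List.nil_append,
        pv_fold_train, List.filter_map, List.map_map]
      rw [List.flatMap_def]
      have hp : (pvP ta ∘ fun k => (k, List.filter (fun f => pvActor f == k) l))
          = (fun a => !(a == ta)) := by
        funext a; rfl
      have hf : ((fun x => x.2) ∘ pvF ∘ fun k => (k, List.filter (fun f => pvActor f == k) l))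
          = (fun a => (List.filter (fun f => pvActor f == a) l).take 30) := by
        funext a; rfl
      rw [hp, hf]
    · -- test lists
      rw [pv_fold_test, List.nil_append]
      apply List.filter_congr
      intro f hf
      have h1 := hpoint f hf
      by_cases h2 : pvActor f = ta
      · have h3 : ¬ (PySem.Set.contains (PySem.Set.ofList
            ((PySem.List.sorted (PySem.Set.ofList (l.map pvActor)) (fun x => x) false).dropLast))
            (pvActor f) = true) := fun hh => (h1.mp hh) h2
        rw [Bool.not_eq_true] at h3
        rw [h3, h2]
        simp
      · rw [h1.mpr h2]
        simp [h2]
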